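-- pv_equiv track=rewrite | github.com/shuvo14051/Problem-Solveing-Online-Judge | URI/0 practice.py | max_consonant
-- ===== SOURCE A (Python) =====
-- def max_consonant(name):
--     count = 0
--     li = []
--     vowels = "aeiou"
--     for i in name.lower():
--         if i not in vowels:
--             count += 1
--         else:
--             li.append(count)
--             count = 0
--     # Add this line to account for the last consonant sequence
--     li.append(count)
--     return li
-- ===== SOURCE B (Python) =====
-- def max_consonant(name):
--     s = name.lower()
--     cuts = [-1] + [i for i, c in enumerate(s) if c in "aeiou"] + [len(s)]
--     return [b - a - 1 for a, b in zip(cuts, cuts[1:])]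
-- ===== Notes on version B (the rewrite author's own statement) =====
-- stated objective: alternative
-- what changed: Instead of scanning with a running counter that is flushed at each vowel, B collects the vowel positions via enumerate, brackets them with -1 and len(s), and returns the gap length between each adjacent pair of cut points.
import Mathlib
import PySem

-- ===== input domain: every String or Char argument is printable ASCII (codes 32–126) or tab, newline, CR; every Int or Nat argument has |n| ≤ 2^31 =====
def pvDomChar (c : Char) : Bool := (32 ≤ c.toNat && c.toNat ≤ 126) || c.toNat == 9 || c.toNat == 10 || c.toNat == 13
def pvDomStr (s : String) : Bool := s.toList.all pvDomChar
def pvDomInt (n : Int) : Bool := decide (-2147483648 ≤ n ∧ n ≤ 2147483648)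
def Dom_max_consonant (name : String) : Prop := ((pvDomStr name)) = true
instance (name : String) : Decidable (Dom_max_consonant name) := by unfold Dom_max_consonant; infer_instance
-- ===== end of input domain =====

-- B replaces A's counter-flush scan by bracketed vowel positions and adjacent gaps (alternative decomposition, same cost).

-- ===== PORT A =====
-- literal transliteration of A: fold over the lowered characters with state (count, li),
-- then append the final count.
def max_consonant (name : String) : List Int :=
  let vowels : List Char := "aeiou".toList
  let r := (PySem.Str.lower name).toList.foldl
    (fun (st : Int × List Int) (i : Char) =>
      if ¬ (vowels.contains i) then (st.1 + 1, st.2)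
      else (0, st.2 ++ [st.1])) ((0 : Int), ([] : List Int))
  r.2 ++ [r.1]

-- ===== PORT B =====
-- literal transliteration of B: vowel positions from enumerate, bracketed by -1 and len(s),
-- then the gaps between adjacent cut points via zip.
def max_consonant_alt (name : String) : List Int :=
  let s := (PySem.Str.lower name).toList
  let cuts : List Int :=
    (-1) :: (((PySem.List.enumerate s).filter (fun p => "aeiou".toList.contains p.2)).map (fun p => p.1))
      ++ [(s.length : Int)]
  List.zipWith (fun a b => b - a - 1) cuts (PySem.List.slice cuts (some 1) none)

-- ===== PRECONDITION & SPEC =====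
def Spec_max_consonant (name : String) (out : List Int) : Prop := out = max_consonant_alt name
instance (name : String) (out : List Int) : Decidable (Spec_max_consonant name out) := by unfold Spec_max_consonant; infer_instance

-- ===== CLAIM (what is proved, stated in full; the proofs are below) =====
def Claim_equal_max_consonant : Prop := ∀ (name : String), Dom_max_consonant name → Spec_max_consonant name (max_consonant name)

-- ===== LEMMAS AND PROOFS =====

-- proof-side recursion describing A's remaining output from state `k`
def funcA (cs : List Char) (k : Int) : List Int :=
  match cs with
  | [] => [k]
  | c :: cs' => if "aeiou".toList.contains c then k :: funcA cs' 0 else funcA cs' (k + 1)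

def addHead (k : Int) : List Int → List Int
  | [] => []
  | x :: xs => (x + k) :: xs

def diffs : List Int → List Int
  | [] => []
  | [_] => []
  | a :: b :: rest => (b - a - 1) :: diffs (b :: rest)

lemma addHead_zero (l : List Int) : addHead 0 l = l := by
  cases l <;> simp [addHead]

lemma addHead_addHead (j k : Int) (l : List Int) :
    addHead j (addHead k l) = addHead (j + k) l := by
  cases l <;> simp [addHead] <;> ring

lemma funcA_shift (cs : List Char) (k : Int) : funcA cs k = addHead k (funcA cs 0) := by
  induction cs generalizing k with
  | nil => simp [funcA, addHead]
  | cons c cs ih =>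
    by_cases h : "aeiou".toList.contains c = true
    · simp only [funcA, h, if_true, addHead]
      congr 1; ring
    · simp only [funcA, h, Bool.false_eq_true, if_false]
      rw [ih (k + 1), ih (0 + 1), addHead_addHead]
      congr 1

lemma foldlA_spec (cs : List Char) (k : Int) (li : List Int) :
    (cs.foldl (fun (st : Int × List Int) (i : Char) =>
        if ¬ (("aeiou".toList).contains i) then (st.1 + 1, st.2)
        else (0, st.2 ++ [st.1])) (k, li)).2
      ++ [(cs.foldl (fun (st : Int × List Int) (i : Char) =>
        if ¬ (("aeiou".toList).contains i) then (st.1 + 1, st.2)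
        else (0, st.2 ++ [st.1])) (k, li)).1]
    = li ++ funcA cs k := by
  induction cs generalizing k li with
  | nil => simp [funcA]
  | cons c cs ih =>
    by_cases h : "aeiou".toList.contains c
    · simp only [List.foldl_cons, h, not_true_eq_false, if_false, if_true, funcA]
      rw [ih]
      simp
    · simp only [List.foldl_cons, h, Bool.false_eq_true, not_false_eq_true, if_true, funcA, if_false]
      rw [ih]

-- B's vowel-position list, with enumeration starting at n
def gIdx (cs : List Char) (n : Int) : List Int :=
  ((PySem.List.enumerate cs n).filter (fun p => "aeiou".toList.contains p.2)).map (fun p => p.1)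

lemma gIdx_cons (c : Char) (cs : List Char) (n : Int) :
    gIdx (c :: cs) n =
      if "aeiou".toList.contains c then n :: gIdx cs (n + 1) else gIdx cs (n + 1) := by
  by_cases h : "aeiou".toList.contains c = true
  · simp only [gIdx, PySem.List.enumerate, List.filter_cons, h, if_true, List.map_cons]
  · simp only [gIdx, PySem.List.enumerate, List.filter_cons, h, Bool.false_eq_true, if_false]

lemma diffs_main (cs : List Char) (n a : Int) :
    diffs (a :: gIdx cs n ++ [n + (cs.length : Int)]) = addHead (n - 1 - a) (funcA cs 0) := by
  induction cs generalizing n a with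
  | nil => simp [gIdx, PySem.List.enumerate, diffs, funcA, addHead]; ring
  | cons c cs ih =>
    rw [gIdx_cons]
    by_cases h : "aeiou".toList.contains c
    · simp only [h, if_true]
      have hne : gIdx cs (n + 1) ++ [(n + 1) + (cs.length : Int)] ≠ [] := by
        cases gIdx cs (n + 1) <;> simp
      have : (a :: n :: gIdx cs (n + 1) ++ [n + ((cs.length : Int) + 1)]) =
          a :: n :: (gIdx cs (n + 1) ++ [(n + 1) + (cs.length : Int)]) := by
        simp; ring_nf
      rw [show ((c :: cs).length : Int) = (cs.length : Int) + 1 by simp]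
      rw [this]
      have hd : diffs (a :: n :: (gIdx cs (n + 1) ++ [(n + 1) + (cs.length : Int)])) =
          (n - a - 1) :: diffs (n :: (gIdx cs (n + 1) ++ [(n + 1) + (cs.length : Int)])) := by
        cases hx : gIdx cs (n + 1) ++ [(n + 1) + (cs.length : Int)] with
        | nil => exact absurd hx hne
        | cons y ys => simp [diffs]
      rw [hd]
      have := ih (n + 1) n
      rw [show n :: gIdx cs (n + 1) ++ [n + 1 + (cs.length : Int)] =
          n :: (gIdx cs (n + 1) ++ [(n + 1) + (cs.length : Int)]) by simp] at this
      rw [this, show (n + 1 - 1 - n : Int) = 0 by ring, addHead_zero]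
      simp only [funcA, h, if_true, addHead]
      congr 1
      ring
    · simp only [h, Bool.false_eq_true, if_false]
      rw [show ((c :: cs).length : Int) = (cs.length : Int) + 1 by simp]
      rw [show (a :: gIdx cs (n + 1) ++ [n + ((cs.length : Int) + 1)]) =
          a :: (gIdx cs (n + 1) ++ [(n + 1) + (cs.length : Int)]) by simp; ring_nf]
      have := ih (n + 1) a
      rw [show a :: gIdx cs (n + 1) ++ [n + 1 + (cs.length : Int)] =
          a :: (gIdx cs (n + 1) ++ [(n + 1) + (cs.length : Int)]) by simp] at this
      rw [this]
      simp only [funcA, h, Bool.false_eq_true, if_false]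
      rw [show (0 + 1 : Int) = 1 by ring, funcA_shift cs 1, addHead_addHead]
      congr 1
      ring

lemma zip_diffs (l : List Int) :
    List.zipWith (fun a b => b - a - 1) l (PySem.List.slice l (some 1) none) = diffs l := by
  rw [PySem.List.slice_from l (by norm_num : (0:Int) ≤ 1)]
  induction l with
  | nil => simp [diffs]
  | cons x xs ih =>
    cases xs with
    | nil => simp [diffs]
    | cons y ys =>
      simp only [Int.toNat_one, List.drop_one, List.tail_cons, List.zipWith_cons_cons, diffs]
      simp only [Int.toNat_one, List.drop_one, List.tail_cons] at ih
      exact congrArg _ ih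

-- ===== VERDICT (by name: the statement is the Claim_ definition above) =====
theorem max_consonant_spec : Claim_equal_max_consonant := by
  intro name _
  unfold Spec_max_consonant max_consonant max_consonant_alt
  set cs := (PySem.Str.lower name).toList with hcs
  simp only []
  rw [foldlA_spec cs 0 [], List.nil_append, zip_diffs]
  have := diffs_main cs 0 (-1)
  rw [show ((-1 : Int) :: gIdx cs 0 ++ [0 + (cs.length : Int)]) =
      ((-1 : Int) :: gIdx cs 0 ++ [(cs.length : Int)]) by simp] at this
  rw [show (0 - 1 - (-1) : Int) = 0 by ring, addHead_zero] at this
  unfold gIdx at this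
  rw [this]
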